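-- pv_equiv track=rewrite | github.com/MCV-2021-M1-Project/Team8 | utils/data.py | fix_multi_image
-- ===== SOURCE A (Python) =====
-- from typing import Tuple, List
--
-- def fix_multi_image(results: List[int], results_files: List[str]) -> List[List[int]]:
--    final_results = []
--    partial_results = []
--    last_file = results_files[0]
--
--    for i in range(len(results)):
--       # Append Results from same image (multi-image)
--       if last_file == results_files[i]:
--             partial_results.append(results[i][0])
--
--       # Different image so we create another list and submit the current
--       else:
--             final_results.append(partial_results)
--             partial_results = []
--             partial_results.append(results[i][0])
--
--       last_file = results_files[i]
--
--    final_results.append(partial_results)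
--
--    return final_results
-- ===== SOURCE B (Python) =====
-- def fix_multi_image(results, results_files):
--     # Builds the grouping back-to-front: scan indices from the end, compare each
--     # filename with its right neighbour, and reverse everything once at the end.
--     n = len(results)
--     groups = [[]]
--     for i in range(n - 1, -1, -1):
--         if i + 1 < n and results_files[i] != results_files[i + 1]:
--             groups.append([])
--         groups[-1].append(results[i][0])
--     return [g[::-1] for g in reversed(groups)]
-- ===== Notes on version B (the rewrite author's own statement) =====
-- stated objective: alternative
-- what changed: B builds the grouping back-to-front: it scans indices from the last to the first, decides a group break by comparing each filename with its right neighbour (instead of tracking a last_file accumulator), and reverses the group list and each group once at the end.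
import Mathlib
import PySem

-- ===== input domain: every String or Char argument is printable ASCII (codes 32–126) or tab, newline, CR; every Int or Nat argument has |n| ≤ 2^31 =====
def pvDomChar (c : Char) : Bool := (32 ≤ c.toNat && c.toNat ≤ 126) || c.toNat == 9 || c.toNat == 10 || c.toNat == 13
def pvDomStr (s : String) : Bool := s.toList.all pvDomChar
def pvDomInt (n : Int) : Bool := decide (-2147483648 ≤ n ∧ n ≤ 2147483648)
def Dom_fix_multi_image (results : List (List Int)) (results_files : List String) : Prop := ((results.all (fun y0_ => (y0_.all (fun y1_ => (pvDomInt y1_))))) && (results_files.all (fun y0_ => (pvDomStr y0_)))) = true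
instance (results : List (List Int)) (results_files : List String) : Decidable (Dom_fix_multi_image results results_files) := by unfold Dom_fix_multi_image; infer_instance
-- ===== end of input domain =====

-- B groups the rows back-to-front (right-neighbour comparison, reverse at the end) instead of
-- A's forward scan with a last_file accumulator; same return value, objective: alternative.

-- ===== PORT A =====
-- A-side helper: the body of A's for-loop; state = (final_results, partial_results, last_file)
def pvStepA (results : List (List Int)) (results_files : List String)
    (s : List (List Int) × List Int × String) (i : Int) : List (List Int) × List Int × String :=
  if s.2.2 = PySem.List.pyGetD results_files i "" then
    (s.1, s.2.1 ++ [PySem.List.pyGetD (PySem.List.pyGetD results i []) 0 0],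
     PySem.List.pyGetD results_files i "")
  else
    (s.1 ++ [s.2.1], [PySem.List.pyGetD (PySem.List.pyGetD results i []) 0 0],
     PySem.List.pyGetD results_files i "")

def fix_multi_image (results : List (List Int)) (results_files : List String) : List (List Int) :=
  let st := (PySem.List.pyRange 0 (results.length : Int) 1).foldl
    (pvStepA results results_files)
    ([], [], PySem.List.pyGetD results_files 0 "")
  st.1 ++ [st.2.1]

-- ===== PORT B =====
-- B-side helper: the body of B's backward for-loop; state = groups (Python list of lists).
-- groups is never empty (it starts as [[]] and only grows), so Python's groups[-1].append(v)
-- is exactly dropLast ++ [last ++ [v]].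
def pvStepB (results : List (List Int)) (results_files : List String)
    (groups : List (List Int)) (i : Int) : List (List Int) :=
  let groups := if i + 1 < (results.length : Int) ∧
      ¬ PySem.List.pyGetD results_files i "" = PySem.List.pyGetD results_files (i + 1) ""
    then groups ++ [[]] else groups
  groups.dropLast ++ [groups.getLastD [] ++ [PySem.List.pyGetD (PySem.List.pyGetD results i []) 0 0]]

def fix_multi_image_alt (results : List (List Int)) (results_files : List String) : List (List Int) :=
  let groups := (PySem.List.pyRange ((results.length : Int) - 1) (-1) (-1)).foldl
    (pvStepB results results_files) [[]]
  (groups.reverse).map List.reverse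

-- ===== PRECONDITION & SPEC =====
-- Pre_ excludes exactly the inputs where Python A raises: results_files[0] (IndexError on []),
-- results_files[i] for i < len(results), and results[i][0] (IndexError on an empty row).
def Pre_fix_multi_image (results : List (List Int)) (results_files : List String) : Prop :=
  results_files ≠ [] ∧ results.length ≤ results_files.length ∧ ∀ r ∈ results, r ≠ []
instance (results : List (List Int)) (results_files : List String) : Decidable (Pre_fix_multi_image results results_files) := by unfold Pre_fix_multi_image; infer_instance

def pvWitness_fix_multi_image : List (List Int) × List String :=
  ([[1], [2, 9], [3]], ["a", "a", "b"])

def Spec_fix_multi_image (results : List (List Int)) (results_files : List String) (out : List (List Int)) : Prop := out = fix_multi_image_alt results results_files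
instance (results : List (List Int)) (results_files : List String) (out : List (List Int)) : Decidable (Spec_fix_multi_image results results_files out) := by unfold Spec_fix_multi_image; infer_instance

-- ===== CLAIM (what is proved, stated in full; the proofs are below) =====
def Claim_equal_fix_multi_image : Prop := ∀ (results : List (List Int)) (results_files : List String), Dom_fix_multi_image results results_files → Pre_fix_multi_image results results_files → Spec_fix_multi_image results results_files (fix_multi_image results results_files)

-- ===== LEMMAS AND PROOFS =====

-- The rows seen by both loops: (filename, first entry) per index i < len(results).
def pvPairs (results : List (List Int)) (results_files : List String) : List (String × Int) :=
  results_files.zip (results.map (fun r => PySem.List.pyGetD r 0 0))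

-- Consecutive grouping of the pair list: the common specification both loops compute.
def pvNewGroup (f : String) : List (String × Int) → Bool
  | [] => false
  | (g, _) :: _ => f != g

def pvConsHead (v : Int) : List (List Int) → List (List Int)
  | [] => [[v]]
  | h :: t => (v :: h) :: t

def pvGrp : List (String × Int) → List (List Int)
  | [] => [[]]
  | (f, v) :: rest => if pvNewGroup f rest then [v] :: pvGrp rest else pvConsHead v (pvGrp rest)

-- A's loop on the pair list.
def pvStepP (s : List (List Int) × List Int × String) (p : String × Int) :
    List (List Int) × List Int × String :=
  if s.2.2 = p.1 then (s.1, s.2.1 ++ [p.2], p.1) else (s.1 ++ [s.2.1], [p.2], p.1)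

def pvGg (f : String) (part : List Int) : List (String × Int) → List (List Int)
  | [] => [part]
  | (g, v) :: rest => if f = g then pvGg g (part ++ [v]) rest else part :: pvGg g [v] rest

def pvMapHd (f : List Int → List Int) : List (List Int) → List (List Int)
  | [] => []
  | h :: t => f h :: t

-- B's loop on the pair list.
def pvBRec : List (String × Int) → List (List Int)
  | [] => [[]]
  | (f, v) :: rest =>
    let groups := pvBRec rest
    let groups := if pvNewGroup f rest then groups ++ [[]] else groups
    groups.dropLast ++ [groups.getLastD [] ++ [v]]

lemma pvGrp_ne_nil (pairs : List (String × Int)) : pvGrp pairs ≠ [] := by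
  match pairs with
  | [] => simp [pvGrp]
  | (f, v) :: rest =>
    unfold pvGrp
    split
    · simp
    · cases h : pvGrp rest <;> simp [pvConsHead]

lemma pvPairs_length (results : List (List Int)) (results_files : List String)
    (hlen : results.length ≤ results_files.length) :
    (pvPairs results results_files).length = results.length := by
  simp [pvPairs]; omega

lemma pvPairs_getElem (results : List (List Int)) (results_files : List String)
    (hlen : results.length ≤ results_files.length) (k : ℕ) (hk : k < results.length) :
    (pvPairs results results_files)[k]'(by rw [pvPairs_length _ _ hlen]; exact hk)
      = (results_files[k]'(by omega), PySem.List.pyGetD (results[k]'hk) 0 0) := by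
  simp [pvPairs]

-- ============ A side ============

lemma pvStepA_eq_pairs (results : List (List Int)) (results_files : List String)
    (hlen : results.length ≤ results_files.length) (k : ℕ) (hk : k < results.length) (st) :
    pvStepA results results_files st (k : Int)
      = pvStepP st ((pvPairs results results_files)[k]'(by rw [pvPairs_length _ _ hlen]; exact hk)) := by
  rw [pvPairs_getElem _ _ hlen k hk]
  simp [pvStepA, pvStepP, List.getD_eq_getElem?_getD, List.getElem?_eq_getElem (show k < results_files.length by omega),
        List.getElem?_eq_getElem hk]

lemma pvIdxA (results : List (List Int)) (results_files : List String)
    (hlen : results.length ≤ results_files.length) :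
    ∀ (m k : ℕ), k + m = results.length → ∀ st,
    (PySem.List.pyRange (k : Int) (results.length : Int) 1).foldl (pvStepA results results_files) st
      = ((pvPairs results results_files).drop k).foldl pvStepP st := by
  intro m
  induction m with
  | zero =>
    intro k hk st
    rw [PySem.List.pyRange_one_eq_nil (by omega)]
    rw [List.drop_eq_nil_of_le (by rw [pvPairs_length _ _ hlen]; omega)]
    rfl
  | succ m ih =>
    intro k hk st
    have hklt : k < results.length := by omega
    have hplen := pvPairs_length results results_files hlen
    rw [PySem.List.pyRange_one_cons (by exact_mod_cast hklt), List.foldl_cons,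
        show (k : Int) + 1 = ((k + 1 : ℕ) : Int) by push_cast; ring,
        ih (k + 1) (by omega), pvStepA_eq_pairs results results_files hlen k hklt st]
    conv_rhs => rw [List.drop_eq_getElem_cons (show k < (pvPairs results results_files).length by omega)]
    rfl

lemma pvKeyA (pairs : List (String × Int)) :
    ∀ (final : List (List Int)) (part : List Int) (f : String),
    (pairs.foldl pvStepP (final, part, f)).1 ++ [(pairs.foldl pvStepP (final, part, f)).2.1]
      = final ++ pvGg f part pairs := by
  induction pairs with
  | nil => intro final part f; simp [pvGg]
  | cons p rest ih =>
    intro final part f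
    obtain ⟨g, v⟩ := p
    by_cases h : f = g
    · simp [pvStepP, pvGg, h, ih]
    · simp [pvStepP, pvGg, h, ih]

lemma pvKeyAB : ∀ (rest : List (String × Int)) (g : String) (v : Int) (part : List Int),
    pvGg g (part ++ [v]) rest = pvMapHd (fun h => part ++ h) (pvGrp ((g, v) :: rest)) := by
  intro rest
  induction rest with
  | nil => intro g v part; simp [pvGg, pvGrp, pvNewGroup, pvConsHead, pvMapHd]
  | cons q rest' ih =>
    intro g v part
    obtain ⟨h, w⟩ := q
    obtain ⟨x, xs, hx⟩ : ∃ x xs, pvGrp ((h, w) :: rest') = x :: xs := by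
      cases hg : pvGrp ((h, w) :: rest') with
      | nil => exact absurd hg (pvGrp_ne_nil _)
      | cons x xs => exact ⟨x, xs, rfl⟩
    by_cases hgh : g = h
    · have := ih h w (part ++ [v])
      rw [hx] at this
      show pvGg g (part ++ [v]) ((h, w) :: rest') = _
      rw [pvGg, if_pos hgh, this]
      have h2 : pvGrp ((g, v) :: (h, w) :: rest') = (v :: x) :: xs := by
        rw [pvGrp, if_neg (by simp [pvNewGroup, hgh]), hx, pvConsHead]
      rw [h2]; simp [pvMapHd]
    · have := ih h w []
      rw [hx] at this
      show pvGg g (part ++ [v]) ((h, w) :: rest') = _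
      rw [pvGg, if_neg hgh]
      have h2 : pvGrp ((g, v) :: (h, w) :: rest') = [v] :: x :: xs := by
        rw [pvGrp, if_pos (by simp [pvNewGroup, hgh]), hx]
      rw [h2]
      simp only [List.nil_append] at this
      simp [pvMapHd, this]

-- ============ B side ============

lemma pvStepB_eq_pairs (results : List (List Int)) (results_files : List String)
    (hlen : results.length ≤ results_files.length) (k : ℕ) (hk : k < results.length) :
    pvStepB results results_files (pvBRec ((pvPairs results results_files).drop (k + 1))) (k : Int)
      = pvBRec ((pvPairs results results_files).drop k) := by
  have hplen : (pvPairs results results_files).length = results.length := pvPairs_length _ _ hlen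
  have hfile : ∀ (j : ℕ) (hj : j < results.length),
      PySem.List.pyGetD results_files (j : Int) "" = results_files[j]'(Nat.lt_of_lt_of_le hj hlen) := by
    intro j hj
    simp [List.getD_eq_getElem?_getD, List.getElem?_eq_getElem (Nat.lt_of_lt_of_le hj hlen)]
  have hgk := hfile k hk
  have hv : PySem.List.pyGetD (PySem.List.pyGetD results (k : Int) []) 0 0
      = PySem.List.pyGetD (results[k]'hk) 0 0 := by
    simp [List.getD_eq_getElem?_getD, List.getElem?_eq_getElem hk]
  rw [List.drop_eq_getElem_cons (show k < (pvPairs results results_files).length by omega)]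
  rw [pvPairs_getElem _ _ hlen k hk]
  rw [pvBRec]
  by_cases hk1 : k + 1 < results.length
  · have hgk1 : PySem.List.pyGetD results_files ((k : Int) + 1) "" = results_files[k + 1]'(by omega) := by
      rw [show (k : Int) + 1 = ((k + 1 : ℕ) : Int) by push_cast; ring]
      exact hfile (k + 1) hk1
    have hrest : (pvPairs results results_files).drop (k + 1)
        = (results_files[k + 1]'(by omega), PySem.List.pyGetD (results[k + 1]'hk1) 0 0)
          :: (pvPairs results results_files).drop (k + 2) := by
      rw [List.drop_eq_getElem_cons (show k + 1 < (pvPairs results results_files).length by omega),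
          pvPairs_getElem _ _ hlen (k + 1) hk1]
    by_cases hne : results_files[k]'(by omega) = results_files[k + 1]'(by omega)
    · rw [pvStepB, if_neg (by rw [hgk, hgk1]; intro hc; exact hc.2 hne)]
      conv_rhs => rw [hrest]
      rw [if_neg (by simp [pvNewGroup, hne])]
      rw [hv, ← hrest]
    · rw [pvStepB, if_pos (by refine ⟨by omega, ?_⟩; rw [hgk, hgk1]; exact hne)]
      conv_rhs => rw [hrest]
      rw [if_pos (by simp [pvNewGroup, hne])]
      rw [hv, ← hrest]
  · have hrest : (pvPairs results results_files).drop (k + 1) = [] :=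
      List.drop_eq_nil_of_le (by omega)
    rw [pvStepB, if_neg (by intro hc; have := hc.1; push_cast at this; omega)]
    rw [if_neg (by rw [hrest]; simp [pvNewGroup])]
    rw [hv]

lemma pvIdxB (results : List (List Int)) (results_files : List String)
    (hlen : results.length ≤ results_files.length) :
    ∀ (m k : ℕ), k + m = results.length →
    (PySem.List.pyRange ((results.length : Int) - 1) ((k : Int) - 1) (-1)).foldl
        (pvStepB results results_files) [[]]
      = pvBRec ((pvPairs results results_files).drop k) := by
  intro m
  induction m with
  | zero =>
    intro k hk
    rw [PySem.List.pyRange_neg_one_eq_nil (by omega)]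
    rw [List.drop_eq_nil_of_le (by rw [pvPairs_length _ _ hlen]; omega), pvBRec]
    rfl
  | succ m ih =>
    intro k hk
    have hklt : k < results.length := by omega
    rw [PySem.List.pyRange_neg_one_eq_reverse]
    rw [show (k : Int) - 1 + 1 = (k : Int) by ring,
        show (results.length : Int) - 1 + 1 = (results.length : Int) by ring]
    rw [PySem.List.pyRange_one_cons (by exact_mod_cast hklt), List.reverse_cons,
        List.foldl_append]
    rw [show PySem.List.pyRange ((k : Int) + 1) (results.length : Int) 1
        = PySem.List.pyRange (((k + 1 : ℕ) : Int) - 1 + 1) ((results.length : Int) - 1 + 1) 1 by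
          norm_num]
    rw [← PySem.List.pyRange_neg_one_eq_reverse, ih (k + 1) (by omega)]
    simp only [List.foldl_cons, List.foldl_nil]
    exact pvStepB_eq_pairs _ _ hlen k hklt

lemma pvKeyB : ∀ (pairs : List (String × Int)),
    pvBRec pairs = ((pvGrp pairs).map List.reverse).reverse := by
  intro pairs
  induction pairs with
  | nil => simp [pvBRec, pvGrp]
  | cons p rest ih =>
    obtain ⟨f, v⟩ := p
    by_cases h : pvNewGroup f rest
    · rw [pvBRec, pvGrp, if_pos h, if_pos h, ih]
      simp
    · obtain ⟨x, xs, hx⟩ : ∃ x xs, pvGrp rest = x :: xs := by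
        cases hg : pvGrp rest with
        | nil => exact absurd hg (pvGrp_ne_nil _)
        | cons x xs => exact ⟨x, xs, rfl⟩
      rw [pvBRec, pvGrp, if_neg h, if_neg h, ih, hx, pvConsHead]
      simp

-- ===== VERDICT (by name: the statement is the Claim_ definition above) =====
theorem fix_multi_image_spec : Claim_equal_fix_multi_image := by
  intro results results_files _ hpre
  obtain ⟨hne, hlen, -⟩ := hpre
  show fix_multi_image results results_files = fix_multi_image_alt results results_files
  have hA0 := pvIdxA results results_files hlen results.length 0 (by omega)
  have hB0 := pvIdxB results results_files hlen results.length 0 (by omega)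
  simp only [Nat.cast_zero, List.drop_zero, zero_sub] at hA0 hB0
  show ((PySem.List.pyRange 0 (results.length : Int) 1).foldl (pvStepA results results_files)
        ([], [], PySem.List.pyGetD results_files 0 "")).1
      ++ [((PySem.List.pyRange 0 (results.length : Int) 1).foldl (pvStepA results results_files)
        ([], [], PySem.List.pyGetD results_files 0 "")).2.1]
    = ((PySem.List.pyRange ((results.length : Int) - 1) (-1) (-1)).foldl
        (pvStepB results results_files) [[]]).reverse.map List.reverse
  rw [hA0 ([], [], PySem.List.pyGetD results_files 0 ""), hB0, pvKeyB]
  simp only [List.reverse_reverse, List.map_map]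
  rw [show (List.reverse ∘ List.reverse : List Int → List Int) = id by
        funext l; simp, List.map_id]
  cases hres : results with
  | nil =>
    subst hres
    simp [pvPairs, pvGrp]
  | cons r rs =>
    cases hfs : results_files with
    | nil => exact absurd hfs hne
    | cons f fs =>
      subst hres hfs
      have hpp : pvPairs (r :: rs) (f :: fs)
          = (f, PySem.List.pyGetD r 0 0) :: pvPairs rs fs := by
        simp [pvPairs]
      have hinit : PySem.List.pyGetD (f :: fs) (0 : Int) "" = f := PySem.List.pyGetD_zero_cons _ _ _
      rw [hinit, pvKeyA, List.nil_append]
      rw [hpp, pvGg, if_pos rfl, pvKeyAB, ← hpp]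
      obtain ⟨x, xs, hx⟩ : ∃ x xs, pvGrp (pvPairs (r :: rs) (f :: fs)) = x :: xs := by
        cases hg : pvGrp (pvPairs (r :: rs) (f :: fs)) with
        | nil => exact absurd hg (pvGrp_ne_nil _)
        | cons x xs => exact ⟨x, xs, rfl⟩
      rw [hpp] at hx
      rw [hpp, hx]
      simp [pvMapHd]
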